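-- pv_equiv track=rewrite | github.com/jyotidhariyaparmar/assign | testdata.py | build_encoding
-- ===== SOURCE A (Python) =====
-- from collections import Counter
--
-- def build_encoding(text):
--     counter = Counter(text)
--     characters = [char for char, _ in counter.most_common()]
--
--     codes = []
--     charset = 'abcdefghijklmnopqrstuvwxyz0123456789'
--
--     for c in charset:
--         codes.append(c)
--
--     if len(characters) > len(codes):
--         for c1 in charset:
--             for c2 in charset:
--                 codes.append(c1 + c2)
--                 if len(codes) >= len(characters):
--                     break
--             if len(codes) >= len(characters):
--                 break
--
--     encoding = {char: code for char, code in zip(characters, codes)}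
--     return encoding
-- ===== SOURCE B (Python) =====
-- from collections import Counter
--
-- def build_encoding(text):
--     characters = [char for char, _ in Counter(text).most_common()]
--     charset = 'abcdefghijklmnopqrstuvwxyz0123456789'
--     encoding = {}
--     for i, char in enumerate(characters):
--         if i < len(charset):
--             code = charset[i]
--         else:
--             q, r = divmod(i - len(charset), len(charset))
--             code = charset[q] + charset[r]
--         encoding[char] = code
--     return encoding
-- ===== Notes on version B (the rewrite author's own statement) =====
-- stated objective: simpler
-- what changed: B keeps Counter+most_common but drops A's materialized codes list (36 singles, nested c1/c2 loops with double break, final zip): it computes each character's code directly from its rank with divmod in one enumerate pass over the characters.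
import Mathlib
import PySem

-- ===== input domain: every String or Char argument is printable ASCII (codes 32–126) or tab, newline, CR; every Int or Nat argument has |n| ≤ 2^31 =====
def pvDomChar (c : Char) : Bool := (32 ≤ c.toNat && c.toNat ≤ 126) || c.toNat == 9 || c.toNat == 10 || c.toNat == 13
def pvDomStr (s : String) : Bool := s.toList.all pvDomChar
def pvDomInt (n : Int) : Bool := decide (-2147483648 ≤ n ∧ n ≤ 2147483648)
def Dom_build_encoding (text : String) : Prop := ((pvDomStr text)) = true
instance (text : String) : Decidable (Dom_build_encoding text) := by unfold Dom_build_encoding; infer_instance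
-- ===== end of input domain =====

-- B replaces A's materialized codes list (36 singles + nested c1/c2 loops with breaks + zip)
-- by computing each character's code directly from its rank with divmod; objective: simpler.

-- ===== PORT A =====
-- shared by both Pythons verbatim: characters = [char for char, _ in Counter(text).most_common()]
def pvCharactersOf (text : String) : List String :=
  (PySem.List.sorted (PySem.Dict.counter text.toList).items (fun p => p.2) true).map
    (fun p => String.ofList [p.1])

def pvCharset : List Char := "abcdefghijklmnopqrstuvwxyz0123456789".toList

-- inner 'for c2 in charset: codes.append(c1+c2); if len(codes) >= n: break'
def pvInnerA (n : Nat) (c1 : Char) : List Char → List String → List String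
  | [], codes => codes
  | c2 :: rest, codes =>
      let codes' := codes ++ [String.ofList [c1, c2]]
      if n ≤ codes'.length then codes' else pvInnerA n c1 rest codes'

-- outer 'for c1 in charset: …inner…; if len(codes) >= n: break'
def pvOuterA (n : Nat) : List Char → List String → List String
  | [], codes => codes
  | c1 :: rest, codes =>
      let codes' := pvInnerA n c1 pvCharset codes
      if n ≤ codes'.length then codes' else pvOuterA n rest codes'

def build_encoding (text : String) : List (String × String) :=
  let characters := pvCharactersOf text
  let codes : List String := pvCharset.foldl (fun codes c => codes ++ [String.ofList [c]]) []
  let codes := if PySem.List.len characters > PySem.List.len codes then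
      pvOuterA characters.length pvCharset codes else codes
  ((characters.zip codes).foldl (fun d (p : String × String) => d.insert p.1 p.2)
      PySem.Dict.empty).items

-- ===== PORT B =====
def pvCodeOfIdx (i : Int) : String :=
  if i < PySem.List.len pvCharset then String.ofList [PySem.List.pyGetD pvCharset i ' ']
  else
    let q := PySem.Int.floordiv (i - PySem.List.len pvCharset) (PySem.List.len pvCharset)
    let r := PySem.Int.mod (i - PySem.List.len pvCharset) (PySem.List.len pvCharset)
    String.ofList [PySem.List.pyGetD pvCharset q ' ', PySem.List.pyGetD pvCharset r ' ']

def build_encoding_alt (text : String) : List (String × String) :=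
  let characters := pvCharactersOf text
  ((PySem.List.enumerate characters 0).foldl
      (fun d (p : Int × String) => d.insert p.2 (pvCodeOfIdx p.1)) PySem.Dict.empty).items

-- ===== PRECONDITION & SPEC =====
def Spec_build_encoding (text : String) (out : List (String × String)) : Prop := out = build_encoding_alt text
instance (text : String) (out : List (String × String)) : Decidable (Spec_build_encoding text out) := by unfold Spec_build_encoding; infer_instance

-- ===== CLAIM (what is proved, stated in full; the proofs are below) =====
def Claim_equal_build_encoding : Prop := ∀ (text : String), Dom_build_encoding text → Spec_build_encoding text (build_encoding text)

-- ===== LEMMAS AND PROOFS =====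

-- the characters list has no duplicates
lemma pvCharacters_nodup (text : String) : (pvCharactersOf text).Nodup := by
  have hperm : (PySem.List.sorted (PySem.Dict.counter text.toList).items (fun p => p.2) true).Perm
      (PySem.Dict.counter text.toList).items := PySem.List.sorted_perm _ _ _
  have hkeys : ((PySem.Dict.counter text.toList).items.map (fun p : Char × Int => p.1)).Nodup := by
    have := PySem.Dict.nodup_keys_counter (xs := text.toList)
    simpa [PySem.Dict.keys] using this
  have h2 : ((PySem.List.sorted (PySem.Dict.counter text.toList).items (fun p => p.2) true).map
      (fun p : Char × Int => p.1)).Nodup := ((hperm.map _).nodup_iff).mpr hkeys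
  have heq : (pvCharactersOf text) =
      ((PySem.List.sorted (PySem.Dict.counter text.toList).items (fun p => p.2) true).map
        (fun p : Char × Int => p.1)).map (fun c => String.ofList [c]) := by
    simp [pvCharactersOf, List.map_map]
  rw [heq]
  refine h2.map ?_
  intro a b h
  have := congrArg String.toList h
  simpa using this

-- at most 127 distinct characters occur in a string of code points ≤ 126
lemma pvCharacters_len_le (text : String) (h : Dom_build_encoding text) :
    (pvCharactersOf text).length ≤ 127 := by
  have hlen : (pvCharactersOf text).length = (PySem.Set.ofList text.toList).length := by
    simp [pvCharactersOf, PySem.List.length_sorted, PySem.Dict.items_counter]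
  rw [hlen]
  have hnd : (PySem.Set.ofList text.toList).Nodup := PySem.Set.nodup_ofList _
  have hndm : ((PySem.Set.ofList text.toList).map Char.toNat).Nodup := by
    refine hnd.map ?_
    intro a b hab
    exact Char.ext (UInt32.toNat_inj.mp hab)
  have hall : ∀ c ∈ text.toList, pvDomChar c = true := by
    have h' : pvDomStr text = true := h
    simpa [pvDomStr, List.all_eq_true] using h'
  have hsub : ((PySem.Set.ofList text.toList).map Char.toNat).toFinset ⊆ Finset.range 127 := by
    intro x hx
    simp only [List.mem_toFinset, List.mem_map] at hx
    obtain ⟨c, hc, rfl⟩ := hx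
    have hcmem : c ∈ text.toList := (PySem.Set.mem_ofList _ _).mp hc
    have hdom : pvDomChar c = true := hall c hcmem
    have : c.toNat ≤ 126 ∨ c.toNat = 9 ∨ c.toNat = 10 ∨ c.toNat = 13 := by
      simp only [pvDomChar, Bool.or_eq_true, Bool.and_eq_true, decide_eq_true_eq, beq_iff_eq] at hdom
      omega
    simp only [Finset.mem_range]
    omega
  have hcard := Finset.card_le_card hsub
  rw [Finset.card_range, List.toFinset_card_of_nodup hndm] at hcard
  simpa using hcard

-- the single-char codes list
lemma pvSingles_eq : pvCharset.foldl (fun codes c => codes ++ [String.ofList [c]]) [] =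
    pvCharset.map (fun c => String.ofList [c]) := by
  simpa using PySem.List.foldl_append_singleton_eq_map (fun c => String.ofList [c]) pvCharset []

lemma pvCharset_length : pvCharset.length = 36 := by decide

-- the inner loop appends the c1-row, truncated at total length n
lemma pvInnerA_eq (n : Nat) (c1 : Char) : ∀ (cs2 : List Char) (codes : List String),
    codes.length < n →
    pvInnerA n c1 cs2 codes = codes ++ (cs2.map (fun c2 => String.ofList [c1, c2])).take (n - codes.length) := by
  intro cs2
  induction cs2 with
  | nil => intro codes h; simp [pvInnerA]
  | cons c2 rest ih =>
    intro codes h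
    rw [pvInnerA]
    by_cases hb : n ≤ (codes ++ [String.ofList [c1, c2]]).length
    · simp only [List.length_append, List.length_cons, List.length_nil] at hb
      have hn : n - codes.length = 1 := by omega
      rw [if_pos (by simpa using hb), hn]
      simp
    · rw [if_neg hb]
      simp only [List.length_append, List.length_cons, List.length_nil, not_le] at hb
      rw [ih _ (by simpa using hb)]
      have h1 : n - (codes ++ [String.ofList [c1, c2]]).length = n - codes.length - 1 := by
        simp; omega
      have h2 : n - codes.length = (n - codes.length - 1) + 1 := by omega
      rw [h1, List.map_cons, h2, List.take_succ_cons]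
      simp

-- the outer loop appends all pairs, truncated at total length n
lemma pvOuterA_eq (n : Nat) : ∀ (cs1 : List Char) (codes : List String),
    codes.length < n →
    pvOuterA n cs1 codes =
      codes ++ (cs1.flatMap (fun c1 => pvCharset.map (fun c2 => String.ofList [c1, c2]))).take (n - codes.length) := by
  intro cs1
  induction cs1 with
  | nil => intro codes h; simp [pvOuterA]
  | cons c1 rest ih =>
    intro codes h
    rw [pvOuterA]
    rw [pvInnerA_eq n c1 pvCharset codes h]
    have hrow : ((pvCharset.map (fun c2 => String.ofList [c1, c2]))).length = 36 := by
      simp [pvCharset_length]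
    have hlen' : (codes ++ (pvCharset.map (fun c2 => String.ofList [c1, c2])).take (n - codes.length)).length
        = codes.length + min (n - codes.length) 36 := by
      simp [hrow]
    by_cases hc : n - codes.length ≤ 36
    · rw [if_pos (by simp only [List.length_append, List.length_take, List.length_map, pvCharset_length]; omega)]
      rw [List.flatMap_cons, List.take_append, hrow]
      have h0 : n - codes.length - 36 = 0 := by omega
      rw [h0]
      simp
    · rw [if_neg (by simp only [List.length_append, List.length_take, List.length_map, pvCharset_length]; omega)]
      have hfull : (pvCharset.map (fun c2 => String.ofList [c1, c2])).take (n - codes.length)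
          = pvCharset.map (fun c2 => String.ofList [c1, c2]) :=
        List.take_of_length_le (by omega)
      rw [hfull, ih _ (by simp [hrow]; omega)]
      rw [List.flatMap_cons, List.take_append, hfull]
      have harg : n - (codes ++ pvCharset.map (fun c2 => String.ofList [c1, c2])).length
          = n - codes.length - (pvCharset.map (fun c2 => String.ofList [c1, c2])).length := by
        simp only [List.length_append]; omega
      rw [harg]
      simp

-- indexing a rectangular flatMap
lemma pvFlatMapIdx {α β γ : Type} (bs : List β) (f : α → β → γ) :
    ∀ (as : List α) (j : Nat), j < as.length * bs.length →
    (as.flatMap (fun a => bs.map (f a)))[j]? =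
      as[j / bs.length]?.bind (fun a => bs[j % bs.length]?.map (f a)) := by
  intro as
  induction as with
  | nil => intro j hj; simp at hj
  | cons a rest ih =>
    intro j hj
    rw [List.flatMap_cons]
    by_cases hjm : j < bs.length
    · rw [List.getElem?_append_left (by simpa using hjm)]
      rw [Nat.div_eq_of_lt hjm, Nat.mod_eq_of_lt hjm]
      simp [List.getElem?_map]
    · have hjm' : bs.length ≤ j := Nat.le_of_not_lt hjm
      have hm : 0 < bs.length := by
        rcases Nat.eq_zero_or_pos bs.length with h0 | h0
        · rw [h0] at hj; simp at hj
        · exact h0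
      rw [List.getElem?_append_right (by simpa using hjm')]
      have hj' : j - bs.length < rest.length * bs.length := by
        simp only [List.length_cons] at hj
        have h2 := Nat.sub_add_cancel hjm'
        nlinarith
      rw [Nat.div_eq_sub_div hm hjm', Nat.mod_eq_sub_mod hjm']
      simp only [List.length_map, List.getElem?_cons_succ]
      exact ih (j - bs.length) hj'

-- the k-th code A builds is pvCodeOfIdx k, for k < n ≤ 1332
lemma pvCodes_getElem (n k : Nat) (hk : k < n) (hn : n ≤ 1332) :
    (if ((n : Int) > 36) then pvOuterA n pvCharset (pvCharset.map (fun c => String.ofList [c]))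
       else pvCharset.map (fun c => String.ofList [c]))[k]? = some (pvCodeOfIdx (k : Int)) := by
  have hlen36 : PySem.List.len pvCharset = (36 : Int) := by decide
  by_cases hk36 : k < 36
  · have hget : (pvCharset.map (fun c => String.ofList [c]))[k]? =
        some (String.ofList [pvCharset[k]'(by rw [pvCharset_length]; omega)]) := by
      rw [List.getElem?_map, List.getElem?_eq_getElem (by rw [pvCharset_length]; omega)]
      rfl
    have hcode : pvCodeOfIdx (k : Int) =
        String.ofList [pvCharset[k]'(by rw [pvCharset_length]; omega)] := by
      rw [pvCodeOfIdx, if_pos (by rw [hlen36]; exact_mod_cast hk36)]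
      rw [PySem.List.pyGetD_natCast, List.getD_eq_getElem _ _ (by rw [pvCharset_length]; omega)]
    by_cases hn36 : ((n : Int) > 36)
    · rw [if_pos hn36]
      have hgt : 36 < n := by exact_mod_cast hn36
      rw [pvOuterA_eq n pvCharset _ (by simp [pvCharset_length]; omega)]
      rw [List.getElem?_append_left (by simp [pvCharset_length]; omega)]
      rw [hget, hcode]
    · rw [if_neg hn36, hget, hcode]
  · have h36k : 36 ≤ k := Nat.le_of_not_lt hk36
    have hn36 : ((n : Int) > 36) := by exact_mod_cast (by omega : 36 < n)
    rw [if_pos hn36]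
    rw [pvOuterA_eq n pvCharset _ (by simp [pvCharset_length]; omega)]
    rw [List.getElem?_append_right (by simp [pvCharset_length]; omega)]
    have hslen : (pvCharset.map (fun c => String.ofList [c])).length = 36 := by
      simp [pvCharset_length]
    rw [hslen]
    rw [List.getElem?_take_of_lt (by omega)]
    have hflat := pvFlatMapIdx pvCharset (fun c1 c2 => String.ofList [c1, c2]) pvCharset (k - 36)
      (by rw [pvCharset_length]; omega)
    rw [pvCharset_length] at hflat
    rw [hflat]
    have hdivlt : (k - 36) / 36 < 36 := by omega
    have hmodlt : (k - 36) % 36 < 36 := by omega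
    rw [List.getElem?_eq_getElem (by rw [pvCharset_length]; omega),
        List.getElem?_eq_getElem (by rw [pvCharset_length]; omega)]
    rw [pvCodeOfIdx, if_neg (by rw [hlen36]; intro hcon; exact hk36 (by exact_mod_cast hcon))]
    simp only [hlen36]
    have hcast : ((k : Int) - 36) = ((k - 36 : Nat) : Int) := by
      push_cast [Nat.cast_sub h36k]; ring
    have h36cast : (36 : Int) = ((36 : Nat) : Int) := by norm_num
    rw [hcast, h36cast, PySem.Int.floordiv_natCast, PySem.Int.mod_natCast]
    rw [PySem.List.pyGetD_natCast, PySem.List.pyGetD_natCast,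
        List.getD_eq_getElem _ _ (by rw [pvCharset_length]; omega),
        List.getD_eq_getElem _ _ (by rw [pvCharset_length]; omega)]
    rfl

theorem pv_main (text : String) (h : Dom_build_encoding text) :
    build_encoding text = build_encoding_alt text := by
  have hnd := pvCharacters_nodup text
  have hle := pvCharacters_len_le text h
  simp only [build_encoding, build_encoding_alt, pvSingles_eq, PySem.List.len_eq,
    List.length_map, pvCharset_length, gt_iff_lt, Nat.cast_ofNat]
  -- name the pieces
  set chars := pvCharactersOf text with hchars
  set codes := (if ((36 : Int) < (chars.length : Int)) then
      pvOuterA chars.length pvCharset (pvCharset.map (fun c => String.ofList [c]))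
    else pvCharset.map (fun c => String.ofList [c])) with hcodes
  have hcodes_get : ∀ (k : Nat), k < chars.length → codes[k]? = some (pvCodeOfIdx (k : Int)) := by
    intro k hk
    have := pvCodes_getElem chars.length k hk (by omega)
    rw [hcodes]
    simpa [gt_iff_lt] using this
  have hclen : chars.length ≤ codes.length := by
    rcases Nat.eq_zero_or_pos chars.length with h0 | h0
    · omega
    · have hg := hcodes_get (chars.length - 1) (by omega)
      obtain ⟨hlt, -⟩ := List.getElem?_eq_some_iff.mp hg
      omega
  have hA := PySem.Dict.items_foldl_insert_fresh (chars.zip codes)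
      (fun p : String × String => p.1) (fun p => p.2) PySem.Dict.empty
      (by intro a _; exact PySem.Dict.contains_empty _)
      (by
        have hfst : List.map (fun p : String × String => p.1) (chars.zip codes) =
            List.map Prod.fst (chars.zip codes) := rfl
        rw [hfst, List.map_fst_zip hclen]; exact hnd)
  have hB := PySem.Dict.items_foldl_insert_fresh (PySem.List.enumerate chars 0)
      (fun p : Int × String => p.2) (fun p => pvCodeOfIdx p.1) PySem.Dict.empty
      (by intro a _; exact PySem.Dict.contains_empty _)
      (by rw [PySem.List.map_snd_enumerate]; exact hnd)
  rw [hA, hB]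
  simp only [PySem.Dict.empty, List.nil_append]
  apply List.ext_getElem?
  intro i
  simp only [List.getElem?_map, PySem.List.getElem?_enumerate]
  by_cases hi : i < chars.length
  · have h1 := List.getElem?_eq_getElem hi
    have h2 := hcodes_get i hi
    simp [List.zip, List.getElem?_zipWith, h1, h2]
  · have hc : chars[i]? = none := List.getElem?_eq_none (by omega)
    have hz : (chars.zip codes)[i]? = none := List.getElem?_eq_none (by simp; omega)
    rw [hz, hc]
    rfl

-- ===== VERDICT (by name: the statement is the Claim_ definition above) =====
theorem build_encoding_spec : Claim_equal_build_encoding := by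
  intro text h
  show build_encoding text = build_encoding_alt text
  exact pv_main text h
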